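-- pv_equiv track=rewrite | github.com/Vincent-LAMBERT/export-hand-poses | export_hand_poses.py | has_valid_multi_joints
-- ===== SOURCE A (Python) =====
-- THUMB="thumb"
--
-- MIDDLE="middle"
--
-- RING="ring"
--
-- MULTI_LINK="multi-link"
--
-- def has_valid_multi_joints(combination) :
--     # If the thumb is a multi-link, return False
--     if any([finger == THUMB and status == MULTI_LINK for finger,status in combination]) :
--         return False
--     # If there is less than 3 multi-links, return False
--     if len([status for finger,status in combination if status == MULTI_LINK]) < 3 :
--         return False
--     # If both the middle and the ring are multi-links, its true, otherwise return False
--     if any([finger == MIDDLE and status == MULTI_LINK for finger,status in combination]) and any([finger == RING and status == MULTI_LINK for finger,status in combination]) :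
--         return True
--     return False
-- ===== SOURCE B (Python) =====
-- THUMB="thumb"
--
-- MIDDLE="middle"
--
-- RING="ring"
--
-- MULTI_LINK="multi-link"
--
-- def has_valid_multi_joints(combination):
--     # One pass: unpack each (finger, status) pair once, maintain four accumulators.
--     thumb_multi = False
--     multi_count = 0
--     middle_multi = False
--     ring_multi = False
--     for finger, status in combination:
--         if status == MULTI_LINK:
--             multi_count += 1
--             if finger == THUMB:
--                 thumb_multi = True
--             elif finger == MIDDLE:
--                 middle_multi = True
--             elif finger == RING:
--                 ring_multi = True
--     return (not thumb_multi) and multi_count >= 3 and middle_multi and ring_multi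
-- ===== Notes on version B (the rewrite author's own statement) =====
-- stated objective: alternative
-- what changed: Replaced four separate list-comprehension scans (each materialising an intermediate list) with a single loop over the combination maintaining four accumulators: thumb/middle/ring multi-link flags and a raw multi-link occurrence count.
import Mathlib
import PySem

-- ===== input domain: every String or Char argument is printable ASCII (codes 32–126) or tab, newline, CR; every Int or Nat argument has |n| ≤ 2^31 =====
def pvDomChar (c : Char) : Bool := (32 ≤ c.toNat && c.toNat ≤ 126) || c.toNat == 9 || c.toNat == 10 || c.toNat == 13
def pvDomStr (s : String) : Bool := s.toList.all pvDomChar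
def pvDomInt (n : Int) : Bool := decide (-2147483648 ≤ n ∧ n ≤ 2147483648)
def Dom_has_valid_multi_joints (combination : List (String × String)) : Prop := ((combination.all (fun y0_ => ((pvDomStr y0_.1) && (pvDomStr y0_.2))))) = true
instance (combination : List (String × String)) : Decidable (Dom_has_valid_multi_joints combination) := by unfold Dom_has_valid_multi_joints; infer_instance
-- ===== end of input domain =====

-- B replaces A's four separate list scans with one fold maintaining four accumulators (same result, one pass).


-- ===== PORT A =====
def has_valid_multi_joints (combination : List (String × String)) : Bool :=
  if combination.any (fun p => p.1 == "thumb" && p.2 == "multi-link") then false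
  else if (combination.filter (fun p => p.2 == "multi-link")).length < 3 then false
  else if (combination.any fun p => p.1 == "middle" && p.2 == "multi-link")
       && (combination.any fun p => p.1 == "ring" && p.2 == "multi-link") then true
  else false

-- ===== PORT B =====
-- step of B's single loop; state = (thumb_multi, multi_count, middle_multi, ring_multi)
def multiStep (st : Bool × Int × Bool × Bool) (p : String × String) : Bool × Int × Bool × Bool :=
  if p.2 == "multi-link" then
    if p.1 == "thumb" then (true, st.2.1 + 1, st.2.2.1, st.2.2.2)
    else if p.1 == "middle" then (st.1, st.2.1 + 1, true, st.2.2.2)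
    else if p.1 == "ring" then (st.1, st.2.1 + 1, st.2.2.1, true)
    else (st.1, st.2.1 + 1, st.2.2.1, st.2.2.2)
  else st

def has_valid_multi_joints_alt (combination : List (String × String)) : Bool :=
  let st := combination.foldl multiStep (false, 0, false, false)
  !st.1 && decide (st.2.1 ≥ 3) && st.2.2.1 && st.2.2.2

-- ===== PRECONDITION & SPEC =====
def Spec_has_valid_multi_joints (combination : List (String × String)) (out : Bool) : Prop := out = has_valid_multi_joints_alt combination
instance (combination : List (String × String)) (out : Bool) : Decidable (Spec_has_valid_multi_joints combination out) := by unfold Spec_has_valid_multi_joints; infer_instance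

-- ===== CLAIM (what is proved, stated in full; the proofs are below) =====
def Claim_equal_has_valid_multi_joints : Prop := ∀ (combination : List (String × String)), Dom_has_valid_multi_joints combination → Spec_has_valid_multi_joints combination (has_valid_multi_joints combination)

-- ===== LEMMAS AND PROOFS =====

-- the fold's four state components are exactly A's four independent scans
theorem multiStep_foldl_inv (l : List (String × String)) :
    ∀ st : Bool × Int × Bool × Bool,
    l.foldl multiStep st =
      (st.1 || l.any (fun p => p.1 == "thumb" && p.2 == "multi-link"),
       st.2.1 + ((l.filter (fun p => p.2 == "multi-link")).length : Int),
       st.2.2.1 || l.any (fun p => p.1 == "middle" && p.2 == "multi-link"),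
       st.2.2.2 || l.any (fun p => p.1 == "ring" && p.2 == "multi-link")) := by
  induction l with
  | nil => intro st; simp
  | cons hd tl ih =>
    intro st
    rcases hd with ⟨f, s⟩
    simp only [List.foldl_cons, ih, List.any_cons, List.filter_cons]
    unfold multiStep
    clear ih
    cases hs : (s == "multi-link") <;>
    cases hf : (f == "thumb") <;>
    cases hm : (f == "middle") <;>
    cases hr : (f == "ring") <;>
    first
      | (simp [hs, hf, hm, hr, Prod.ext_iff] <;> omega)
      | simp_all

theorem has_valid_multi_joints_spec : Claim_equal_has_valid_multi_joints := by
  unfold Claim_equal_has_valid_multi_joints Spec_has_valid_multi_joints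
  intro combination _
  unfold has_valid_multi_joints has_valid_multi_joints_alt
  rw [multiStep_foldl_inv]
  simp only [zero_add]
  by_cases hT : combination.any (fun p => p.1 == "thumb" && p.2 == "multi-link") <;>
  by_cases hM : combination.any (fun p => p.1 == "middle" && p.2 == "multi-link") <;>
  by_cases hR : combination.any (fun p => p.1 == "ring" && p.2 == "multi-link") <;>
  by_cases hC : (combination.filter (fun p => p.2 == "multi-link")).length < 3 <;>
  simp [hT, hM, hR, hC] <;> omega
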